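-- pv_equiv track=rewrite | github.com/tomasriverah/IIC2233 | Tareas/T00/main.py | check_ganador
-- ===== SOURCE A (Python) =====
-- import copy
--
-- def check_ganador(tablero, tablero_escondido):
--     contador_fila = 0
--     copia = copy.deepcopy(tablero_escondido)
--
--     for fila in copia:
--         contador_casillero = 0
--         for  casillero in fila:
--             if copia[contador_fila][contador_casillero] == "L":
--                 copia[contador_fila][contador_casillero] = " "
--             contador_casillero += 1
--         contador_fila += 1
--
--     if tablero == copia:
--         return True
--     else:
--         return False
-- ===== SOURCE B (Python) =====
-- def check_ganador(tablero, tablero_escondido):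
--     if len(tablero) != len(tablero_escondido):
--         return False
--     for fila, fila_esc in zip(tablero, tablero_escondido):
--         if len(fila) != len(fila_esc):
--             return False
--         for cel, esc in zip(fila, fila_esc):
--             if cel != (" " if esc == "L" else esc):
--                 return False
--     return True
-- ===== Notes on version B (the rewrite author's own statement) =====
-- stated objective: simpler
-- what changed: B drops the deepcopy and the intermediate transformed grid and compares the two boards cell-by-cell in one fused short-circuiting pass (blanking 'L' on the fly).
import Mathlib
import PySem

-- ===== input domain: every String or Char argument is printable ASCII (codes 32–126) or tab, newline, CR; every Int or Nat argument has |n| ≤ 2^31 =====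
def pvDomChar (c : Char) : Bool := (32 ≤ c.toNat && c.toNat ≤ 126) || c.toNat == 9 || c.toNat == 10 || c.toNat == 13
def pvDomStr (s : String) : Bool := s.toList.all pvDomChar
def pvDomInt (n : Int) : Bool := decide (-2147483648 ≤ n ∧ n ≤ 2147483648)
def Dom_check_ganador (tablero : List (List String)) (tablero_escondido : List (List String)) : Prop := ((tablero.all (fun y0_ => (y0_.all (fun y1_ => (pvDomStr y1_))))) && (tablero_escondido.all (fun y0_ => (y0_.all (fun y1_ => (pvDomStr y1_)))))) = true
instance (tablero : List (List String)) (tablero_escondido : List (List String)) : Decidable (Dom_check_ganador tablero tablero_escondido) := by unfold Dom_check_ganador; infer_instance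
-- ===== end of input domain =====

-- B drops the deepcopy and the intermediate transformed grid: one fused cell-by-cell
-- short-circuiting comparison pass (objective: simpler).

-- ===== PORT A =====
-- A deep-copies tablero_escondido, replaces every "L" cell by " " in the copy, and
-- compares tablero with the transformed grid; the index-driven in-place rewrite of each
-- cell is rendered as the per-cell map it performs.
def check_ganador (tablero : List (List String)) (tablero_escondido : List (List String)) : Bool :=
  let copia := tablero_escondido.map (fun fila =>
    fila.map (fun casillero => if casillero == "L" then " " else casillero))
  if tablero == copia then true else false

-- ===== PORT B =====
def check_ganador_alt (tablero : List (List String)) (tablero_escondido : List (List String)) : Bool :=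
  if tablero.length != tablero_escondido.length then false
  else (tablero.zip tablero_escondido).all (fun p =>
    if p.1.length != p.2.length then false
    else (p.1.zip p.2).all (fun q => q.1 == (if q.2 == "L" then " " else q.2)))

-- ===== PRECONDITION & SPEC =====
def Spec_check_ganador (tablero : List (List String)) (tablero_escondido : List (List String)) (out : Bool) : Prop := out = check_ganador_alt tablero tablero_escondido
instance (tablero : List (List String)) (tablero_escondido : List (List String)) (out : Bool) : Decidable (Spec_check_ganador tablero tablero_escondido out) := by unfold Spec_check_ganador; infer_instance

-- ===== CLAIM (what is proved, stated in full; the proofs are below) =====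
def Claim_equal_check_ganador : Prop := ∀ (tablero : List (List String)) (tablero_escondido : List (List String)), Dom_check_ganador tablero tablero_escondido → Spec_check_ganador tablero tablero_escondido (check_ganador tablero tablero_escondido)

-- ===== LEMMAS AND PROOFS =====

-- "xs equals ys mapped through f" ⟺ "same length and every zipped pair matches through f".
theorem eq_map_iff_zip_all {α β : Type} [DecidableEq α] (f : β → α) :
    ∀ (xs : List α) (ys : List β),
      (xs = ys.map f) ↔ (xs.length = ys.length ∧ (xs.zip ys).all (fun q => q.1 == f q.2) = true) := by
  intro xs
  induction xs with
  | nil => intro ys; cases ys <;> simp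
  | cons x xs ih =>
    intro ys
    cases ys with
    | nil => simp
    | cons y ys =>
      simp only [List.map_cons, List.cons.injEq, List.length_cons, List.zip_cons_cons,
        List.all_cons, Bool.and_eq_true, beq_iff_eq, ih ys]
      constructor
      · rintro ⟨h1, h2, h3⟩; exact ⟨by omega, h1, h3⟩
      · rintro ⟨h1, h2, h3⟩; exact ⟨h2, by omega, h3⟩

-- B's fused pass returns true exactly when tablero equals the blanked hidden board.
theorem alt_iff (tablero tablero_escondido : List (List String)) :
    check_ganador_alt tablero tablero_escondido = true ↔
      tablero = tablero_escondido.map (fun fila =>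
        fila.map (fun casillero => if casillero == "L" then " " else casillero)) := by
  unfold check_ganador_alt
  rw [eq_map_iff_zip_all]
  simp only [bne_iff_ne, ne_eq, ite_not]
  have hrow : ∀ p : List String × List String,
      ((if p.1.length = p.2.length then
          (p.1.zip p.2).all (fun q => q.1 == (if q.2 == "L" then " " else q.2)) else false) = true ↔
        p.1 = p.2.map (fun casillero => if casillero == "L" then " " else casillero)) := by
    intro p
    rw [eq_map_iff_zip_all]
    split
    · next hl => simp [hl]
    · next hl => simp [hl]
  by_cases hlen : tablero.length = tablero_escondido.length
  · simp only [hlen, if_true, true_and, List.all_eq_true]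
    constructor
    · intro h p hp; simpa using (hrow p).mp (h p hp)
    · intro h p hp; exact (hrow p).mpr (by simpa using h p hp)
  · simp [hlen]

-- ===== VERDICT (by name: the statement is the Claim_ definition above) =====
theorem check_ganador_spec : Claim_equal_check_ganador := by
  intro tablero tablero_escondido _
  unfold Spec_check_ganador check_ganador
  by_cases hA : tablero = tablero_escondido.map (fun fila =>
      fila.map (fun casillero => if casillero == "L" then " " else casillero))
  · have hb : (tablero == tablero_escondido.map (fun fila =>
        fila.map (fun casillero => if casillero == "L" then " " else casillero))) = true :=
      beq_iff_eq.mpr hA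
    simp only [hb, if_true]
    exact ((alt_iff _ _).mpr hA).symm
  · rw [if_neg (by simpa using hA), eq_comm]
    simp only [Bool.eq_false_iff, ne_eq, alt_iff]
    exact hA
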